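-- pv_equiv track=rewrite | github.com/jasmin-baier/tabiya-livelihoods-classifier | scripts/3_llm_reranker/3_2b_clean_LLM_create_opp-db.py | disjoint_optional_from_essential
-- ===== SOURCE A (Python) =====
-- import unicodedata
-- from typing import Any, Dict, Iterable, Iterator, List, Optional, Tuple, Set
--
-- def norm_label(s: Optional[str]) -> Optional[str]:
--     if s is None:
--         return None
--     return unicodedata.normalize("NFKC", str(s)).strip().casefold()
--
-- def disjoint_optional_from_essential(
--     essential: List[Dict[str, Optional[str]]],
--     optional: List[Dict[str, Optional[str]]],
-- ) -> List[Dict[str, Optional[str]]]: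
--     ess_norms = {norm_label(x.get("preferred_label")) for x in essential if x}
--     out: List[Dict[str, Optional[str]]] = []
--     for item in optional:
--         if norm_label(item.get("preferred_label")) in ess_norms:
--             continue
--         out.append(item)
--     return out
-- ===== SOURCE B (Python) =====
-- import unicodedata
-- from typing import Dict, List, Optional
--
--
-- def norm_label(s: Optional[str]) -> Optional[str]:
--     if s is None:
--         return None
--     return unicodedata.normalize("NFKC", str(s)).strip().casefold()
--
--
-- def disjoint_optional_from_essential(
--     essential: List[Dict[str, Optional[str]]],
--     optional: List[Dict[str, Optional[str]]],
-- ) -> List[Dict[str, Optional[str]]]: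
--     # Sieve: iterate over ESSENTIAL, each round removing from the surviving
--     # optional items those whose normalized label equals this essential key.
--     remaining = list(optional)
--     for e in essential:
--         if not e:
--             continue
--         k = norm_label(e.get("preferred_label"))
--         remaining = [item for item in remaining
--                      if norm_label(item.get("preferred_label")) != k]
--     return remaining
-- ===== Notes on version B (the rewrite author's own statement) =====
-- stated objective: alternative
-- what changed: B inverts the loop structure: instead of A's single pass over optional testing membership in a precomputed set of essential labels, B iterates over essential and repeatedly sieves the surviving optional list, removing items with the current essential key each round.
import Mathlib
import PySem

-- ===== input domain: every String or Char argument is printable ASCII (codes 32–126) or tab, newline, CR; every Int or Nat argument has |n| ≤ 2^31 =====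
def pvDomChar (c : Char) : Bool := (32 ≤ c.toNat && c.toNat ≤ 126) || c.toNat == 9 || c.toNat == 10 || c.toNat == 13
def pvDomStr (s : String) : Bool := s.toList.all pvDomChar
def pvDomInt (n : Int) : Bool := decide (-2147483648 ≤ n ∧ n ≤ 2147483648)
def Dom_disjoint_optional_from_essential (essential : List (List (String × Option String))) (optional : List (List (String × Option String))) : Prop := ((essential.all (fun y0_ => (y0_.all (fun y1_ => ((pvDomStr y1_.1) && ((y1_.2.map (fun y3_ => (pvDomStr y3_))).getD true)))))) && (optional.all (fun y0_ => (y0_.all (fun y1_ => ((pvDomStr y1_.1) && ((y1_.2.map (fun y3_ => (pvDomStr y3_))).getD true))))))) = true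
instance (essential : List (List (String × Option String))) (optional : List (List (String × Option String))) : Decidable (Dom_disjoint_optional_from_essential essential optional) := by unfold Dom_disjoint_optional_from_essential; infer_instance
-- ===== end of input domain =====

-- B inverts the loop structure: it iterates over essential and repeatedly sieves the
-- surviving optional list, instead of A's single pass over optional with a set lookup.


-- ===== PORT A =====
-- norm_label: on the ASCII domain NFKC is the identity and casefold = lower,
-- so norm_label(s) = lower(strip(s)); exact on Dom's printable-ASCII strings.
def normLabel (s? : Option String) : Option String :=
  match s? with
  | none => none
  | some s => some (PySem.Str.lower (PySem.Str.strip s))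

-- x.get("preferred_label"): first matching key, default None (dict = assoc list, first match)
def getPref (x : List (String × Option String)) : Option String :=
  (List.lookup "preferred_label" x).join

def disjoint_optional_from_essential (essential : List (List (String × Option String))) (optional : List (List (String × Option String))) : List (List (String × Option String)) :=
  -- ess_norms = {norm_label(x.get("preferred_label")) for x in essential if x}
  let essNorms : PySem.Set (Option String) :=
    PySem.Set.ofList ((essential.filter (fun x => !x.isEmpty)).map (fun x => normLabel (getPref x)))
  -- for item in optional: if … in ess_norms: continue; out.append(item)
  optional.foldl
    (fun out item =>
      if PySem.Set.contains essNorms (normLabel (getPref item)) then out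
      else out ++ [item]) []

-- ===== PORT B =====
-- sieve: fold over essential, each round filtering the surviving optional items
def disjoint_optional_from_essential_alt (essential : List (List (String × Option String))) (optional : List (List (String × Option String))) : List (List (String × Option String)) :=
  essential.foldl
    (fun remaining e =>
      if e.isEmpty then remaining
      else
        let k := normLabel (getPref e)
        remaining.filter (fun item => !(normLabel (getPref item) == k)))
    optional

-- ===== PRECONDITION & SPEC =====
def Spec_disjoint_optional_from_essential (essential : List (List (String × Option String))) (optional : List (List (String × Option String))) (out : List (List (String × Option String))) : Prop := out = disjoint_optional_from_essential_alt essential optional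
instance (essential : List (List (String × Option String))) (optional : List (List (String × Option String))) (out : List (List (String × Option String))) : Decidable (Spec_disjoint_optional_from_essential essential optional out) := by unfold Spec_disjoint_optional_from_essential; infer_instance

-- ===== CLAIM =====
def Claim_equal_disjoint_optional_from_essential : Prop := ∀ (essential : List (List (String × Option String))) (optional : List (List (String × Option String))), Dom_disjoint_optional_from_essential essential optional → Spec_disjoint_optional_from_essential essential optional (disjoint_optional_from_essential essential optional)

-- ===== LEMMAS AND PROOFS =====

-- membership in A's precomputed set equals an any-scan over essential
lemma contains_essNorms (essential : List (List (String × Option String))) (k : Option String) :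
    PySem.Set.contains (PySem.Set.ofList ((essential.filter (fun x => !x.isEmpty)).map (fun x => normLabel (getPref x)))) k
      = essential.any (fun e => !e.isEmpty && (normLabel (getPref e) == k)) := by
  rw [Bool.eq_iff_iff]
  simp only [PySem.Set.contains_iff, PySem.Set.mem_ofList, List.mem_map, List.mem_filter,
    List.any_eq_true, Bool.and_eq_true, beq_iff_eq]
  constructor
  · rintro ⟨x, ⟨hx, he⟩, hk⟩; exact ⟨x, hx, he, hk⟩
  · rintro ⟨x, hx, he, hk⟩; exact ⟨x, ⟨hx, he⟩, hk⟩

-- B's sieve over essential equals one filter by an any-scan over essential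
lemma sieve_eq_filter (essential : List (List (String × Option String))) (rem : List (List (String × Option String))) :
    disjoint_optional_from_essential_alt essential rem
      = rem.filter (fun item => !(essential.any (fun e => !e.isEmpty && (normLabel (getPref e) == normLabel (getPref item))))) := by
  induction essential generalizing rem with
  | nil => simp [disjoint_optional_from_essential_alt]
  | cons e rest ih =>
    unfold disjoint_optional_from_essential_alt
    simp only [List.foldl_cons]
    rw [show (List.foldl _ _ rest : List (List (String × Option String))) = disjoint_optional_from_essential_alt rest _ from rfl]
    by_cases he : e.isEmpty
    · rw [if_pos he, ih]
      congr 1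
      funext item
      simp [he]
    · rw [if_neg he, ih, List.filter_filter]
      congr 1
      funext item
      simp only [List.any_cons, Bool.not_or, Bool.and_comm]
      cases h : normLabel (getPref item) == normLabel (getPref e)
      · simp_all
        exact fun _ heq => h heq.symm
      · simp_all

-- ===== VERDICT =====
theorem disjoint_optional_from_essential_spec : Claim_equal_disjoint_optional_from_essential := by
  intro essential optional _
  show disjoint_optional_from_essential essential optional
      = disjoint_optional_from_essential_alt essential optional
  rw [sieve_eq_filter]
  unfold disjoint_optional_from_essential
  have hfun :
      (fun (out : List (List (String × Option String))) item =>
        if PySem.Set.contains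
            (PySem.Set.ofList ((essential.filter (fun x => !x.isEmpty)).map
              (fun x => normLabel (getPref x)))) (normLabel (getPref item)) then out
        else out ++ [item])
      = (fun out item =>
        if !(essential.any (fun e => !e.isEmpty && (normLabel (getPref e) == normLabel (getPref item))))
        then out ++ [item] else out) := by
    funext out item
    rw [contains_essNorms]
    cases h : essential.any (fun e => !e.isEmpty && (normLabel (getPref e) == normLabel (getPref item))) <;> simp
  simp only [hfun]
  rw [PySem.List.foldl_append_if_eq_filter]
  simp
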